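-- pv_equiv track=rewrite | github.com/MRM-MB/CLARIX | clarix/data_loader.py | _detect_plant_from_wc
-- ===== SOURCE A (Python) =====
-- def _detect_plant_from_wc(wc: str) -> str:
--     """'P01_NW01_PRESS_1' -> 'NW01'."""
--     if not isinstance(wc, str):
--         return ""
--     parts = wc.split("_")
--     for p in parts:
--         if p.startswith("NW") and len(p) <= 5:
--             return p
--     return ""
-- ===== SOURCE B (Python) =====
-- def _detect_plant_from_wc(wc: str) -> str:
--     """'P01_NW01_PRESS_1' -> 'NW01'."""
--     if not isinstance(wc, str):
--         return ""
--     tok = []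
--     for ch in wc + "_":
--         if ch == "_":
--             if 2 <= len(tok) <= 5 and tok[0] == "N" and tok[1] == "W":
--                 return "".join(tok)
--             tok = []
--         else:
--             tok.append(ch)
--     return ""
-- ===== Notes on version B (the rewrite author's own statement) =====
-- stated objective: alternative
-- what changed: Replaces the underscore-split plus a loop over the resulting token list by a single character-level scan that accumulates the current token and tests it at each delimiter (and at the end via an appended delimiter), never materialising the list of parts.
import Mathlib
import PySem

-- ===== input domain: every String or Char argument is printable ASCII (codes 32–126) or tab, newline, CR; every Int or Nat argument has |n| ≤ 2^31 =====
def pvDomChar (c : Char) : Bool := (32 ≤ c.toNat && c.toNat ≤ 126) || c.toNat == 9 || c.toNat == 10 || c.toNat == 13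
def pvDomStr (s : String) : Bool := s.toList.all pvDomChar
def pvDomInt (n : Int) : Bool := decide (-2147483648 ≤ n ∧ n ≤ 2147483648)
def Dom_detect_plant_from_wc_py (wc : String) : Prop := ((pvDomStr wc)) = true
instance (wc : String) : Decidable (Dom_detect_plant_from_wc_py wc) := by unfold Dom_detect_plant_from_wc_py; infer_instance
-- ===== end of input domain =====

-- B replaces underscore-split plus a loop over the parts by a single character-level scan with a running token buffer (alternative decomposition, same cost).


-- ===== PORT A =====
-- for p in parts: if p.startswith("NW") and len(p) <= 5: return p; return ""
def pvALoop : List (List Char) → String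
  | [] => ""
  | p :: rest =>
    if PySem.Chars.startswith p ['N', 'W'] = true ∧ p.length ≤ 5 then String.ofList p
    else pvALoop rest

def detect_plant_from_wc_py (wc : String) : String :=
  pvALoop (PySem.Chars.splitOn wc.toList ['_'])

-- ===== PORT B =====
-- if 2 <= len(tok) <= 5 and tok[0] == "N" and tok[1] == "W"
def pvGood (tok : List Char) : Bool :=
  decide (2 ≤ tok.length ∧ tok.length ≤ 5 ∧ tok[0]? = some 'N' ∧ tok[1]? = some 'W')

-- for ch in wc + "_": at '_' test and reset the buffer, otherwise append ch to it
def pvBGo : List Char → List Char → String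
  | [], _ => ""
  | c :: rest, tok =>
    if c = '_' then
      (if pvGood tok = true then String.ofList tok else pvBGo rest [])
    else pvBGo rest (tok ++ [c])

def detect_plant_from_wc_py_alt (wc : String) : String :=
  pvBGo (wc.toList ++ ['_']) []

-- ===== PRECONDITION & SPEC =====
def Spec_detect_plant_from_wc_py (wc : String) (out : String) : Prop := out = detect_plant_from_wc_py_alt wc
instance (wc : String) (out : String) : Decidable (Spec_detect_plant_from_wc_py wc out) := by unfold Spec_detect_plant_from_wc_py; infer_instance

-- ===== CLAIM (what is proved, stated in full; the proofs are below) =====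
def Claim_equal_detect_plant_from_wc_py : Prop := ∀ (wc : String), Dom_detect_plant_from_wc_py wc → Spec_detect_plant_from_wc_py wc (detect_plant_from_wc_py wc)

-- ===== LEMMAS AND PROOFS =====

-- the two token tests agree
theorem pvGood_eq (tok : List Char) :
    (pvGood tok = true) ↔ (PySem.Chars.startswith tok ['N', 'W'] = true ∧ tok.length ≤ 5) := by
  match tok with
  | [] => simp [pvGood, PySem.Chars.startswith]
  | [a] => simp [pvGood, PySem.Chars.startswith, List.isPrefixOf]
  | a :: b :: t =>
    simp only [pvGood, PySem.Chars.startswith, List.isPrefixOf]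
    simp
    constructor
    · rintro ⟨h1, h2, h3⟩; exact ⟨⟨h2.symm, h3.symm⟩, h1⟩
    · rintro ⟨⟨h2, h3⟩, h1⟩; exact ⟨h1, h2.symm, h3.symm⟩

-- splitOn.go is a homomorphism in its accumulator
theorem pvGo_acc (fuel : Nat) (l cur : List Char) (acc : List (List Char)) :
    PySem.Chars.splitOn.go ['_'] fuel l cur acc
      = acc.reverse ++ PySem.Chars.splitOn.go ['_'] fuel l cur [] := by
  induction fuel generalizing l cur acc with
  | zero => simp [PySem.Chars.splitOn.go]
  | succ f ih =>
    match l with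
    | [] => simp [PySem.Chars.splitOn.go]
    | c :: rest =>
      by_cases hc : List.isPrefixOf ['_'] (c :: rest) = true
      · simp only [PySem.Chars.splitOn.go, hc, if_pos]
        rw [ih, ih _ _ [cur.reverse]]
        simp
      · simp only [PySem.Chars.splitOn.go, hc]
        rw [if_neg (by simp [hc]), if_neg (by simp [hc]), ih]

-- main invariant: char-scan with buffer r.reverse matches A's loop over the remaining split
-- the buffer test followed by either return matches A's per-part test
theorem pvStep (tok : List Char) (k : String) :
    (if pvGood tok = true then String.ofList tok else k)
      = (if PySem.Chars.startswith tok ['N', 'W'] = true ∧ tok.length ≤ 5 then String.ofList tok else k) := by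
  by_cases hg : pvGood tok = true
  · rw [if_pos hg, if_pos ((pvGood_eq _).mp hg)]
  · rw [if_neg hg, if_neg (fun h => hg ((pvGood_eq _).mpr h))]

-- main invariant: char-scan with buffer r.reverse matches A's loop over the remaining split
theorem pvMain (l : List Char) (fuel : Nat) (r : List Char) (hf : l.length < fuel) :
    pvBGo (l ++ ['_']) r.reverse
      = pvALoop (PySem.Chars.splitOn.go ['_'] fuel l r []) := by
  induction l generalizing fuel r with
  | nil =>
    match fuel, hf with
    | f + 1, _ =>
      simp only [PySem.Chars.splitOn.go, List.nil_append, List.reverse_cons,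
        List.reverse_nil, List.nil_append]
      have hb : pvBGo ['_'] r.reverse
          = (if pvGood r.reverse = true then String.ofList r.reverse else "") := by
        simp [pvBGo]
      rw [hb, pvStep]
      simp [pvALoop]
  | cons c rest ih =>
    match fuel, hf with
    | f + 1, hf =>
      by_cases hc : c = '_'
      · subst hc
        have hpre : List.isPrefixOf ['_'] ('_' :: rest) = true := by
          simp [List.isPrefixOf]
        simp only [PySem.Chars.splitOn.go, hpre, if_pos, List.length_cons,
          List.length_nil, List.drop_succ_cons, List.drop_zero]
        rw [pvGo_acc]
        simp only [List.reverse_cons, List.reverse_nil, List.nil_append,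
          List.singleton_append]
        have hb : pvBGo ('_' :: (rest ++ ['_'])) r.reverse
            = (if pvGood r.reverse = true then String.ofList r.reverse
               else pvBGo (rest ++ ['_']) []) := by
          simp [pvBGo]
        rw [List.cons_append, hb, pvStep]
        simp only [pvALoop]
        have := ih f ([] : List Char) (by simpa using Nat.lt_of_succ_lt_succ hf)
        simp only [List.reverse_nil] at this
        rw [this]
      · have hpre : ¬ List.isPrefixOf ['_'] (c :: rest) = true := by
          simp only [List.isPrefixOf, Bool.and_eq_true, beq_iff_eq]
          intro h
          exact hc h.1.symm
        simp only [PySem.Chars.splitOn.go]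
        rw [if_neg hpre]
        have hb : pvBGo (c :: (rest ++ ['_'])) r.reverse
            = pvBGo (rest ++ ['_']) (r.reverse ++ [c]) := by
          simp [pvBGo, hc]
        rw [List.cons_append, hb, show r.reverse ++ [c] = (c :: r).reverse by simp]
        exact ih f (c :: r) (by simpa using Nat.lt_of_succ_lt_succ hf)

-- ===== VERDICT (by name: the statement is the Claim_ definition above) =====
theorem detect_plant_from_wc_py_spec : Claim_equal_detect_plant_from_wc_py := by
  intro wc _
  unfold Spec_detect_plant_from_wc_py detect_plant_from_wc_py detect_plant_from_wc_py_alt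
  unfold PySem.Chars.splitOn
  have := pvMain wc.toList (wc.toList.length + 1) [] (by omega)
  simpa using this.symm
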